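-- pv_equiv track=rewrite | github.com/envomp/Beyond-the-Linear-Separability-Ceiling | scripts/hf_models.py | find_image_token_ranges_gemma
-- ===== SOURCE A (Python) =====
-- def find_image_token_ranges_gemma(inputs):
--     image_ranges = []
--
--     for sample in inputs['input_ids']:
--         image_indices = {}
--         start_index = None
--         image_id = 1
--         for i, token_id in enumerate(sample):
--             if hasattr(token_id, 'item'):
--                 token_id = token_id.item()
--
--             if token_id == 255999 or token_id == 262144:
--                 if start_index is None:
--                     start_index = i
--             elif token_id == 256000:
--                 if start_index is not None:
--                     end_index = i
--                     if start_index <= end_index: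
--                         image_indices[image_id] = (start_index, end_index)
--                         image_id += 1
--                     start_index = None
--             else:
--                 start_index = None
--         image_ranges.append(image_indices)
--
--     return image_ranges
-- ===== SOURCE B (Python) =====
-- def find_image_token_ranges_gemma(inputs):
--     image_ranges = []
--     for sample in inputs['input_ids']:
--         tokens = [t.item() if hasattr(t, 'item') else t for t in sample]
--         image_indices = {}
--         image_id = 1
--         for i, tok in enumerate(tokens):
--             # an image range ends at each 256000 immediately preceded by a
--             # run of start tokens; its start is found by a local backward walk
--             if tok == 256000 and i > 0 and tokens[i - 1] in (255999, 262144):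
--                 j = i - 1
--                 while j > 0 and tokens[j - 1] in (255999, 262144):
--                     j -= 1
--                 image_indices[image_id] = (j, i)
--                 image_id += 1
--         image_ranges.append(image_indices)
--     return image_ranges
-- ===== Notes on version B (the rewrite author's own statement) =====
-- stated objective: alternative
-- what changed: B drops A's running start_index state and its always-true start<=end check: it scans only for end markers (256000) and recomputes each range's start by a local backward walk over the preceding run of start tokens.
-- outside the precondition, e.g. on find_image_token_ranges_gemma({'other_key': [[1, 2]]}): A raises KeyError, B raises KeyError
import Mathlib
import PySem

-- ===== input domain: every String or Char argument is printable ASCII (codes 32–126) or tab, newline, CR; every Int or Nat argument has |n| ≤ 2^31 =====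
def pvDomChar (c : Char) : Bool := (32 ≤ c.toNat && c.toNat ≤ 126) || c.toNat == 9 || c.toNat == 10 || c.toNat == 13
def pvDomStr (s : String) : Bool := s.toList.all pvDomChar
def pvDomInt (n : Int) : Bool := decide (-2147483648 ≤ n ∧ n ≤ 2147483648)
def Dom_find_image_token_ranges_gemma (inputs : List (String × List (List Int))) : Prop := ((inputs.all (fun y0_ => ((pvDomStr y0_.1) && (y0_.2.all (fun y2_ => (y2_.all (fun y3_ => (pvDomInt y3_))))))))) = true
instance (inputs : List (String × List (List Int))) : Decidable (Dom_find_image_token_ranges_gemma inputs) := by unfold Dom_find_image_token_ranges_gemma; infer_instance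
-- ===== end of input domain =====

-- B drops A's running start_index state: it scans only for end markers (256000) and
-- recomputes each range's start by a local backward walk over the run of start tokens.
-- (same O(n) cost; objective: alternative)

-- ===== PORT A =====
-- one step of A's inner loop; the Python 'hasattr(token_id, "item")' branch is a no-op
-- on plain ints and is omitted.  State: (image_indices, start_index, image_id).
def pvAstep (s : PySem.Dict Int (Int × Int) × Option Int × Int) (p : Int × Int) :
    PySem.Dict Int (Int × Int) × Option Int × Int :=
  let d := s.1; let start := s.2.1; let id := s.2.2
  let i := p.1; let tok := p.2
  if tok = 255999 ∨ tok = 262144 then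
    match start with
    | none => (d, some i, id)
    | some _ => (d, start, id)
  else if tok = 256000 then
    match start with
    | some si => if si ≤ i then (d.insert id (si, i), none, id + 1) else (d, none, id)
    | none => (d, none, id)
  else (d, none, id)

def pvAsample (sample : List Int) : List (Int × Int × Int) :=
  ((PySem.List.enumerate sample 0).foldl pvAstep (PySem.Dict.empty, none, 1)).1.items

def find_image_token_ranges_gemma (inputs : List (String × List (List Int))) : List (List (Int × Int × Int)) :=
  match List.lookup "input_ids" inputs with
  | none => []   -- Python raises KeyError here; excluded by Pre_
  | some samples => samples.map pvAsample

-- ===== PORT B =====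
-- Source B's 'tokens = [t.item() if hasattr(t, "item") else t for t in sample]' is the
-- identity on plain ints and is omitted.
def pvStart (t : Int) : Bool := t == 255999 || t == 262144

-- the backward while-loop of Source B: from j, walk back while the previous token is a start token
def pvBack (ts : List Int) : Nat → Nat
  | 0 => 0
  | j + 1 => if pvStart (ts.getD j 0) then pvBack ts j else j + 1

def pvBstep (ts : List Int) (s : PySem.Dict Int (Int × Int) × Int) (p : Int × Int) :
    PySem.Dict Int (Int × Int) × Int :=
  let d := s.1; let id := s.2; let i := p.1; let tok := p.2
  if tok == 256000 && decide (0 < i) && pvStart (ts.getD (i - 1).toNat 0) then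
    (d.insert id ((pvBack ts (i - 1).toNat : Int), i), id + 1)
  else s

def pvBsample (ts : List Int) : List (Int × Int × Int) :=
  ((PySem.List.enumerate ts 0).foldl (pvBstep ts) (PySem.Dict.empty, 1)).1.items

def find_image_token_ranges_gemma_alt (inputs : List (String × List (List Int))) : List (List (Int × Int × Int)) :=
  match List.lookup "input_ids" inputs with
  | none => []
  | some samples => samples.map pvBsample

-- ===== PRECONDITION & SPEC =====
-- Pre_ excludes only inputs without an 'input_ids' key, on which the Python A raises KeyError.
def Pre_find_image_token_ranges_gemma (inputs : List (String × List (List Int))) : Prop :=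
  "input_ids" ∈ inputs.map Prod.fst
instance (inputs : List (String × List (List Int))) : Decidable (Pre_find_image_token_ranges_gemma inputs) := by unfold Pre_find_image_token_ranges_gemma; infer_instance
def pvWitness_find_image_token_ranges_gemma : (List (String × List (List Int))) :=
  [("input_ids", [[255999, 255999, 256000, 7]])]

def Spec_find_image_token_ranges_gemma (inputs : List (String × List (List Int))) (out : List (List (Int × Int × Int))) : Prop := out = find_image_token_ranges_gemma_alt inputs
instance (inputs : List (String × List (List Int))) (out : List (List (Int × Int × Int))) : Decidable (Spec_find_image_token_ranges_gemma inputs out) := by unfold Spec_find_image_token_ranges_gemma; infer_instance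

-- ===== CLAIM (what is proved, stated in full; the proofs are below) =====
def Claim_equal_find_image_token_ranges_gemma : Prop := ∀ (inputs : List (String × List (List Int))), Dom_find_image_token_ranges_gemma inputs → Pre_find_image_token_ranges_gemma inputs → Spec_find_image_token_ranges_gemma inputs (find_image_token_ranges_gemma inputs)

-- ===== LEMMAS AND PROOFS =====

-- A's start_index at the moment position k is about to be processed
def pvStartState (s : List Int) (k : Nat) : Option Int :=
  if k ≠ 0 ∧ pvStart (s.getD (k - 1) 0) = true then some (pvBack s k : Int) else none

lemma pvBack_le (ts : List Int) (k : Nat) : pvBack ts k ≤ k := by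
  induction k with
  | zero => simp [pvBack]
  | succ j ih => simp only [pvBack]; split <;> omega

lemma pvSS_succ_pos (s : List Int) (k : Nat) (h : pvStart (s.getD k 0) = true) :
    pvStartState s (k + 1) = some (pvBack s k : Int) := by
  unfold pvStartState
  rw [if_pos ⟨Nat.succ_ne_zero k, by simpa using h⟩]
  simp only [pvBack, h, if_true]

lemma pvSS_succ_neg (s : List Int) (k : Nat) (h : pvStart (s.getD k 0) = false) :
    pvStartState s (k + 1) = none := by
  unfold pvStartState
  rw [if_neg]
  rintro ⟨-, hc⟩
  rw [Nat.add_sub_cancel, h] at hc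
  exact Bool.false_ne_true hc

lemma pvSS_none_elim (s : List Int) (k : Nat) (h : pvStartState s k = none)
    (hst : pvStart (s.getD k 0) = true) : pvBack s k = k := by
  cases k with
  | zero => simp [pvBack]
  | succ m =>
    cases hp : pvStart (s.getD m 0) with
    | true =>
      exfalso
      rw [pvStartState, if_pos ⟨Nat.succ_ne_zero m, by simpa using hp⟩] at h
      exact Option.some_ne_none _ h
    | false => simp only [pvBack, hp, if_false, Bool.false_eq_true]

lemma pvSS_some_elim (s : List Int) (k : Nat) (v : Int) (h : pvStartState s k = some v) :
    k ≠ 0 ∧ pvStart (s.getD (k - 1) 0) = true ∧ v = (pvBack s k : Int) := by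
  unfold pvStartState at h
  by_cases hc : k ≠ 0 ∧ pvStart (s.getD (k - 1) 0) = true
  · rw [if_pos hc] at h
    exact ⟨hc.1, hc.2, (Option.some.injEq _ _ ▸ h).symm⟩
  · rw [if_neg hc] at h
    exact absurd h (by simp)

lemma pvGetD_app (pre rest : List Int) (t : Int) :
    (pre ++ t :: rest).getD pre.length 0 = t := by
  rw [List.getD_eq_getElem?_getD, List.getElem?_append_right (Nat.le_refl pre.length)]
  simp

-- one step of A's loop keeps the start-state invariant, and matches one step of B's loop
lemma pvStep_pair (s : List Int) (k : Nat) (t : Int) (ht : s.getD k 0 = t)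
    (d : PySem.Dict Int (Int × Int)) (id : Int) :
    ∃ d' id', pvAstep (d, pvStartState s k, id) ((k : Int), t) = (d', pvStartState s (k + 1), id')
      ∧ pvBstep s (d, id) ((k : Int), t) = (d', id') := by
  by_cases hst : pvStart t = true
  · have ht' : t = 255999 ∨ t = 262144 := by
      rcases Bool.or_eq_true_iff.mp hst with h | h
      · exact Or.inl (by exact_mod_cast eq_of_beq h)
      · exact Or.inr (by exact_mod_cast eq_of_beq h)
    have htok : (t == 256000) = false := by rcases ht' with h | h <;> simp [h]
    have hB : pvBstep s (d, id) ((k : Int), t) = (d, id) := by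
      simp [pvBstep, htok]
    have hnew := pvSS_succ_pos s k (by rw [ht]; exact hst)
    cases hA : pvStartState s k with
    | none =>
      have hbk : pvBack s k = k := pvSS_none_elim s k hA (by rw [ht]; exact hst)
      exact ⟨d, id, by simp [pvAstep, hnew, hbk, if_pos ht'], hB⟩
    | some v =>
      obtain ⟨-, -, hv⟩ := pvSS_some_elim s k v hA
      exact ⟨d, id, by simp [pvAstep, hnew, hv, if_pos ht'], hB⟩
  · have hst' : pvStart t = false := Bool.eq_false_iff.mpr hst
    have ht' : ¬(t = 255999 ∨ t = 262144) := by
      rintro (h | h) <;> simp [pvStart, h] at hst'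
    have hnew := pvSS_succ_neg s k (by rw [ht]; exact hst')
    by_cases he : t = 256000
    · subst he
      cases hA : pvStartState s k with
      | none =>
        refine ⟨d, id, by simp [pvAstep, hnew], ?_⟩
        cases k with
        | zero => simp [pvBstep]
        | succ m =>
          have hp : pvStart (s.getD m 0) = false := by
            cases hp : pvStart (s.getD m 0) with
            | false => rfl
            | true =>
              exfalso
              rw [pvStartState, if_pos ⟨Nat.succ_ne_zero m, by simpa using hp⟩] at hA
              exact Option.some_ne_none _ hA
          have htn : (((m + 1 : Nat) : Int) - 1).toNat = m := by push_cast; omega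
          have hp' : pvStart (s[m]?.getD 0) = false := by
            rw [List.getD_eq_getElem?_getD] at hp; exact hp
          simp [pvBstep, hp']
      | some v =>
        obtain ⟨hk0, hprev, hv⟩ := pvSS_some_elim s (k) v hA
        rcases Nat.exists_eq_succ_of_ne_zero hk0 with ⟨m, rfl⟩
        simp only [Nat.succ_eq_add_one] at hprev hv hnew ht hA ⊢
        rw [Nat.add_sub_cancel] at hprev
        have hback : pvBack s (m + 1) = pvBack s m := by
          simp only [pvBack, hprev, if_true]
        have hle : v ≤ ((m : Int) + 1) := by
          rw [hv]
          exact_mod_cast pvBack_le s (m + 1)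
        have hprev' : pvStart (s[m]?.getD 0) = true := by
          rw [List.getD_eq_getElem?_getD] at hprev; exact hprev
        refine ⟨d.insert id (v, ((m + 1 : Nat) : Int)), id + 1, ?_, ?_⟩
        · simp [pvAstep, hnew, hle]
        · have htn : (((m + 1 : Nat) : Int) - 1).toNat = m := by push_cast; omega
          have hpos : (0 : Int) < ((m + 1 : Nat) : Int) := by push_cast; omega
          simp only [pvBstep, htn]
          rw [if_pos (by simp [hprev'])]
          rw [hv, hback]
    · have htok : (t == 256000) = false := by simp [he]
      refine ⟨d, id, ?_, by simp [pvBstep, htok]⟩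
      cases hA : pvStartState s k <;> simp [pvAstep, hnew, if_neg ht', he]

lemma pvLoop (s : List Int) : ∀ (rest pre : List Int), s = pre ++ rest →
    ∀ (d : PySem.Dict Int (Int × Int)) (id : Int),
    (let r := (PySem.List.enumerate rest (pre.length : Int)).foldl pvAstep (d, pvStartState s pre.length, id)
     (r.1, r.2.2)) =
    (PySem.List.enumerate rest (pre.length : Int)).foldl (pvBstep s) (d, id) := by
  intro rest
  induction rest with
  | nil => intro pre _ d id; simp [PySem.List.enumerate_nil]
  | cons t rest' ih =>
    intro pre hs d id
    have hts : s.getD pre.length 0 = t := by rw [hs]; exact pvGetD_app pre rest' t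
    obtain ⟨d', id', hA, hB⟩ := pvStep_pair s pre.length t hts d id
    have hs' : s = (pre ++ [t]) ++ rest' := by simp [hs]
    have hlen' : (pre ++ [t]).length = pre.length + 1 := by simp
    rw [PySem.List.enumerate_cons]
    simp only [List.foldl_cons]
    rw [hA, hB]
    have := ih (pre ++ [t]) hs' d' id'
    rw [hlen'] at this
    rw [show ((pre.length : Int) + 1) = ((pre.length + 1 : Nat) : Int) by push_cast; ring]
    exact this

lemma pvSample_eq (s : List Int) : pvAsample s = pvBsample s := by
  have h := pvLoop s s [] rfl PySem.Dict.empty 1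
  simp only [List.length_nil, Nat.cast_zero] at h
  have h0 : pvStartState s 0 = none := by simp [pvStartState]
  rw [h0] at h
  unfold pvAsample pvBsample
  rw [show ((PySem.List.enumerate s 0).foldl (pvBstep s) (PySem.Dict.empty, 1)).1
        = ((PySem.List.enumerate s 0).foldl pvAstep (PySem.Dict.empty, none, 1)).1 from
      (congrArg Prod.fst h.symm)]

-- ===== VERDICT (by name: the statement is the Claim_ definition above) =====
theorem find_image_token_ranges_gemma_spec : Claim_equal_find_image_token_ranges_gemma := by
  intro inputs _ _
  unfold Spec_find_image_token_ranges_gemma find_image_token_ranges_gemma find_image_token_ranges_gemma_alt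
  cases List.lookup "input_ids" inputs with
  | none => rfl
  | some samples => simp [pvSample_eq]
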